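-- pv_equiv track=rewrite | github.com/rwang97/ee225-project | denoiser/downsample.py | find_save_path
-- ===== SOURCE A (Python) =====
-- def find_save_path(path, last_name='train'):
--     path = str(path).split('/')
--     save_path = []
--     for child in reversed(path):
--         if child == last_name:
--             break
--         save_path.append(child)
--
--     save_path = reversed(save_path)
--     save_path = '/'.join(save_path)
--
--     return save_path
-- ===== SOURCE B (Python) =====
-- def find_save_path(path, last_name='train'):
--     parts = str(path).split('/')
--     cut = -1
--     for i, p in enumerate(parts):
--         if p == last_name:
--             cut = i
--     return '/'.join(parts[cut + 1:])
-- ===== Notes on version B (the rewrite author's own statement) =====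
-- stated objective: alternative
-- what changed: Replaces the reverse-iterate/early-break/accumulate-then-re-reverse structure with a single forward scan that records the index of the last marker occurrence and one slice-and-join.
import Mathlib
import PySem

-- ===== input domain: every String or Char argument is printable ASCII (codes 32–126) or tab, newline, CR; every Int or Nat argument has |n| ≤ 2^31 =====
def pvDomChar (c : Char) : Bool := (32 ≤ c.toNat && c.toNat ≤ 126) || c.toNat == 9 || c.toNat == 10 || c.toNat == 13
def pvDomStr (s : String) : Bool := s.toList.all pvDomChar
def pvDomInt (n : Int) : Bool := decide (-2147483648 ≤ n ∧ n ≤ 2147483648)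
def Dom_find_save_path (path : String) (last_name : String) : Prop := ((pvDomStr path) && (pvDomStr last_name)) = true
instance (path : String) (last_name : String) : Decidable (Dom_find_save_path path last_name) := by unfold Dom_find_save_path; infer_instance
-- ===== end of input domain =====

-- B replaces A's reverse-iterate/early-break/re-reverse accumulation by a forward scan for the
-- last marker index followed by one slice; same cost, different decomposition.

-- ===== PORT A =====
-- the 'for child in reversed(path): if child == last_name: break; save_path.append(child)' loop
def pvLoopA : List String → String → List String → List String
  | [], _, acc => acc
  | c :: rest, m, acc => if c == m then acc else pvLoopA rest m (acc ++ [c])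

def find_save_path (path : String) (last_name : String) : String :=
  let parts := (PySem.Str.split? path "/").getD []   -- sep "/" is nonempty, so split? is always some
  let save_path := pvLoopA parts.reverse last_name []
  PySem.Str.join "/" save_path.reverse

-- ===== PORT B =====
def find_save_path_alt (path : String) (last_name : String) : String :=
  let parts := (PySem.Str.split? path "/").getD []   -- sep "/" is nonempty, so split? is always some
  let cut : Int := (PySem.List.enumerate parts 0).foldl
    (fun cut ip => if ip.2 == last_name then ip.1 else cut) (-1)
  PySem.Str.join "/" (PySem.List.slice parts (some (cut + 1)) none)

-- ===== PRECONDITION & SPEC =====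
def Spec_find_save_path (path : String) (last_name : String) (out : String) : Prop := out = find_save_path_alt path last_name
instance (path : String) (last_name : String) (out : String) : Decidable (Spec_find_save_path path last_name out) := by unfold Spec_find_save_path; infer_instance

-- ===== CLAIM (what is proved, stated in full; the proofs are below) =====
def Claim_equal_find_save_path : Prop := ∀ (path : String) (last_name : String), Dom_find_save_path path last_name → Spec_find_save_path path last_name (find_save_path path last_name)

-- ===== LEMMAS AND PROOFS =====

def pvCut (l : List String) (m : String) : Int :=
  (PySem.List.enumerate l 0).foldl (fun cut ip => if ip.2 == m then ip.1 else cut) (-1)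

theorem pvLoopA_acc (m : String) : ∀ (xs acc : List String),
    pvLoopA xs m acc = acc ++ pvLoopA xs m [] := by
  intro xs
  induction xs with
  | nil => intro acc; simp [pvLoopA]
  | cons c rest ih =>
    intro acc
    by_cases h : (c == m) = true
    · simp [pvLoopA, h]
    · simp only [pvLoopA, h, Bool.false_eq_true, if_false, List.nil_append]
      rw [ih (acc ++ [c]), ih [c]]
      simp

theorem pvCut_append (l : List String) (a m : String) :
    pvCut (l ++ [a]) m = if (a == m) = true then (l.length : Int) else pvCut l m := by
  simp [pvCut, PySem.List.enumerate_append, List.foldl_append, PySem.List.enumerate_cons]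

theorem pvCut_bound (m : String) (l : List String) :
    -1 ≤ pvCut l m ∧ pvCut l m < l.length := by
  induction l using List.reverseRecOn with
  | nil => simp [pvCut, PySem.List.enumerate_nil]
  | append_singleton l a ih =>
    rw [pvCut_append]
    by_cases h : (a == m) = true
    · simp only [h, if_true, List.length_append, List.length_cons, List.length_nil]
      push_cast; omega
    · simp only [h, Bool.false_eq_true, if_false, List.length_append, List.length_cons,
        List.length_nil]
      push_cast; omega

theorem pvMain (m : String) (l : List String) :
    (pvLoopA l.reverse m []).reverse = l.drop ((pvCut l m + 1).toNat) := by
  induction l using List.reverseRecOn with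
  | nil => simp [pvLoopA, pvCut, PySem.List.enumerate_nil]
  | append_singleton l a ih =>
    have hrev : (l ++ [a]).reverse = a :: l.reverse := by simp
    rw [hrev, pvCut_append]
    by_cases h : (a == m) = true
    · simp only [pvLoopA, h, if_true, List.reverse_nil]
      exact (List.drop_eq_nil_of_le (by simp)).symm
    · have hb := pvCut_bound m l
      simp only [pvLoopA, h, Bool.false_eq_true, if_false, List.nil_append]
      rw [pvLoopA_acc, List.reverse_append, ih]
      rw [List.drop_append_of_le_length (by omega)]
      simp

-- ===== VERDICT (by name: the statement is the Claim_ definition above) =====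
theorem find_save_path_spec : Claim_equal_find_save_path := by
  intro path last_name _
  show find_save_path path last_name = find_save_path_alt path last_name
  simp only [find_save_path, find_save_path_alt]
  have hb := pvCut_bound last_name ((PySem.Str.split? path "/").getD [])
  rw [show (PySem.List.enumerate ((PySem.Str.split? path "/").getD []) 0).foldl
      (fun cut ip => if ip.2 == last_name then ip.1 else cut) (-1 : Int)
      = pvCut ((PySem.Str.split? path "/").getD []) last_name from rfl]
  rw [PySem.List.slice_from _ (by omega)]
  rw [pvMain]
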